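-- pv_equiv track=rewrite | github.com/DavidResin/sitsitex | src/python/ordering.py | process
-- ===== SOURCE A (Python) =====
-- def process(songs, limit):
-- 	curr_batches = [([], 0, list(songs.keys()))]
-- 	next_batches = []
-- 	finals = []
--
-- 	while curr_batches:
-- 		for choice, length, rem in curr_batches:
-- 			# End of the list
-- 			if len(rem) == 0:
-- 				finals += [(choice, length)]
-- 				continue
--
-- 			# Case where song not chosen
-- 			next_batches += [(choice, length, rem[1:])]
--
-- 			# Case where song chosen and it fits the page
-- 			if length + songs[rem[0]] <= limit:
-- 				next_batches += [(choice + [rem[0]], length + songs[rem[0]], rem[1:])]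
--
-- 		curr_batches = next_batches
-- 		next_batches = []
--
-- 	return finals
-- ===== SOURCE B (Python) =====
-- def process(songs, limit):
-- 	keys = list(songs.keys())
--
-- 	def rec(i, choice, length):
-- 		if i == len(keys):
-- 			return [(choice, length)]
-- 		res = rec(i + 1, choice, length)
-- 		v = songs[keys[i]]
-- 		if length + v <= limit:
-- 			res += rec(i + 1, choice + [keys[i]], length + v)
-- 		return res
--
-- 	return rec(0, [], 0)
-- ===== Notes on version B (the rewrite author's own statement) =====
-- stated objective: alternative
-- what changed: Replaced the level-by-level BFS over explicit batch queues (curr/next lists of (choice,length,remaining) triples) with a skip-first recursive DFS over the key index that builds the result list directly; since every leaf of the decision tree sits at the same depth, the leaf order is identical.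
import Mathlib
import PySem

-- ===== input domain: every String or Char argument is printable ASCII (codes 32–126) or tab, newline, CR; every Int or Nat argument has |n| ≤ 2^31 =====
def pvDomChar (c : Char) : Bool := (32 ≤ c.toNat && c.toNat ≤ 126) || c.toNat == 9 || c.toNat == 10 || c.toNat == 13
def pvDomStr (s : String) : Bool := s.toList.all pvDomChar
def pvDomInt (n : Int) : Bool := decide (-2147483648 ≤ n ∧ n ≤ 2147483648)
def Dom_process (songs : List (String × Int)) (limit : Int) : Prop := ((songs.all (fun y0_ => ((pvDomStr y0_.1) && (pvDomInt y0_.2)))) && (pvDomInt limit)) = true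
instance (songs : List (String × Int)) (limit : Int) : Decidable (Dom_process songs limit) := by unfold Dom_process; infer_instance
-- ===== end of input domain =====

-- B replaces A's level-by-level BFS over explicit batch queues with a skip-first recursive
-- DFS over the keys; since all leaves sit at the same depth the leaf order is identical (objective: alternative).

-- ===== PORT A =====
-- one body of A's inner `for` loop: state = (next_batches, finals), batch = (choice, length, rem)
def stepA (d : PySem.Dict String Int) (limit : Int)
    (acc : List (List String × Int × List String) × List (List String × Int))
    (b : List String × Int × List String) :
    List (List String × Int × List String) × List (List String × Int) :=
  match b with
  | (choice, length, rem) =>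
    match rem with
    | [] => (acc.1, acc.2 ++ [(choice, length)])
    | r0 :: rest =>
      let v := d.getD r0 0          -- songs[rem[0]] : key comes from d.keys, so always present
      let nb := acc.1 ++ [(choice, length, rest)]
      if length + v ≤ limit then (nb ++ [(choice ++ [r0], length + v, rest)], acc.2)
      else (nb, acc.2)

-- A's `while curr_batches:` loop; fuel bounds the number of levels (= keys.length + 1), purely to make it total
def loopA (d : PySem.Dict String Int) (limit : Int) :
    Nat → List (List String × Int × List String) → List (List String × Int) → List (List String × Int)
  | 0, _, finals => finals
  | fuel + 1, curr, finals =>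
    if curr = [] then finals
    else
      let p := curr.foldl (stepA d limit) ([], [])
      loopA d limit fuel p.1 (finals ++ p.2)

def process (songs : List (String × Int)) (limit : Int) : List (List String × Int) :=
  let d := PySem.Dict.ofList songs
  loopA d limit (d.keys.length + 1) [([], 0, d.keys)] []

-- ===== PORT B =====
-- Source B's rec(i, choice, length), structural recursion over the suffix of keys
def dfsB (d : PySem.Dict String Int) (limit : Int) :
    List String → List String → Int → List (List String × Int)
  | [], choice, length => [(choice, length)]
  | k :: ks, choice, length =>
    let res := dfsB d limit ks choice length
    let v := d.getD k 0
    if length + v ≤ limit then res ++ dfsB d limit ks (choice ++ [k]) (length + v)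
    else res

def process_alt (songs : List (String × Int)) (limit : Int) : List (List String × Int) :=
  let d := PySem.Dict.ofList songs
  dfsB d limit d.keys [] 0

-- ===== PRECONDITION & SPEC =====
def Spec_process (songs : List (String × Int)) (limit : Int) (out : List (List String × Int)) : Prop := out = process_alt songs limit
instance (songs : List (String × Int)) (limit : Int) (out : List (List String × Int)) : Decidable (Spec_process songs limit out) := by unfold Spec_process; infer_instance

-- ===== CLAIM (what is proved, stated in full; the proofs are below) =====
def Claim_equal_process : Prop := ∀ (songs : List (String × Int)) (limit : Int), Dom_process songs limit → Spec_process songs limit (process songs limit)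

-- ===== LEMMAS AND PROOFS =====

-- the children a batch contributes to next_batches
def childOf (d : PySem.Dict String Int) (limit : Int)
    (b : List String × Int × List String) : List (List String × Int × List String) :=
  match b with
  | (_, _, []) => []
  | (choice, length, r0 :: rest) =>
    let v := d.getD r0 0
    (choice, length, rest) ::
      (if length + v ≤ limit then [(choice ++ [r0], length + v, rest)] else [])

-- what a batch contributes to finals
def finOf (b : List String × Int × List String) : List (List String × Int) :=
  match b with
  | (choice, length, []) => [(choice, length)]
  | (_, _, _ :: _) => []

def dfsOf (d : PySem.Dict String Int) (limit : Int)
    (b : List String × Int × List String) : List (List String × Int) :=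
  dfsB d limit b.2.2 b.1 b.2.1

theorem flatMap_congr' {α β : Type} {l : List α} {f g : α → List β}
    (h : ∀ a ∈ l, f a = g a) : l.flatMap f = l.flatMap g := by
  induction l with
  | nil => rfl
  | cons x xs ih =>
    simp only [List.flatMap_cons]
    rw [h x (by simp), ih (fun a ha => h a (by simp [ha]))]

theorem fold_stepA (d : PySem.Dict String Int) (limit : Int)
    (curr : List (List String × Int × List String))
    (nb : List (List String × Int × List String)) (fin : List (List String × Int)) :
    curr.foldl (stepA d limit) (nb, fin)
      = (nb ++ curr.flatMap (childOf d limit), fin ++ curr.flatMap finOf) := by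
  induction curr generalizing nb fin with
  | nil => simp
  | cons b bs ih =>
    obtain ⟨choice, length, rem⟩ := b
    cases rem with
    | nil =>
      simp only [List.foldl_cons, stepA, ih, List.flatMap_cons, childOf, finOf]
      simp
    | cons r0 rest =>
      simp only [List.foldl_cons, stepA, List.flatMap_cons, childOf, finOf]
      split_ifs with h <;> simp [ih]

theorem loopA_nil (d : PySem.Dict String Int) (limit : Int) (fuel : Nat)
    (finals : List (List String × Int)) : loopA d limit fuel [] finals = finals := by
  cases fuel <;> simp [loopA]

theorem loopA_eq_dfs (d : PySem.Dict String Int) (limit : Int) (m : Nat) :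
    ∀ (fuel : Nat) (curr : List (List String × Int × List String))
      (finals : List (List String × Int)),
      (∀ b ∈ curr, b.2.2.length = m) → m < fuel →
      loopA d limit fuel curr finals = finals ++ curr.flatMap (dfsOf d limit) := by
  induction m with
  | zero =>
    intro fuel curr finals hlen hf
    obtain ⟨fuel, rfl⟩ : ∃ k, fuel = k + 1 := ⟨fuel - 1, by omega⟩
    by_cases hc : curr = []
    · subst hc; simp [loopA_nil]
    · simp only [loopA, if_neg hc, fold_stepA]
      have hchild : curr.flatMap (childOf d limit) = [] := by
        have h1 : curr.flatMap (childOf d limit)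
            = curr.flatMap (fun _ => ([] : List (List String × Int × List String))) := by
          apply flatMap_congr'
          intro b hb
          obtain ⟨c, l, rem⟩ := b
          have : rem = [] := List.eq_nil_of_length_eq_zero (hlen _ hb)
          simp [this, childOf]
        simp [h1]
      have hfin : curr.flatMap finOf = curr.flatMap (dfsOf d limit) := by
        apply flatMap_congr'
        intro b hb
        obtain ⟨c, l, rem⟩ := b
        have : rem = [] := List.eq_nil_of_length_eq_zero (hlen _ hb)
        simp [this, finOf, dfsOf, dfsB]
      simp [hchild, hfin, loopA_nil]
  | succ m ih =>
    intro fuel curr finals hlen hf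
    obtain ⟨fuel, rfl⟩ : ∃ k, fuel = k + 1 := ⟨fuel - 1, by omega⟩
    by_cases hc : curr = []
    · subst hc; simp [loopA_nil]
    · simp only [loopA, if_neg hc, fold_stepA]
      have hfin : curr.flatMap finOf = [] := by
        have h1 : curr.flatMap finOf
            = curr.flatMap (fun _ => ([] : List (List String × Int))) := by
          apply flatMap_congr'
          intro b hb
          obtain ⟨c, l, rem⟩ := b
          cases rem with
          | nil => exact absurd (hlen _ hb) (by simp)
          | cons r0 rest => simp [finOf]
        simp [h1]
      have hchildlen : ∀ b' ∈ curr.flatMap (childOf d limit), b'.2.2.length = m := by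
        intro b' hb'
        rw [List.mem_flatMap] at hb'
        obtain ⟨b, hb, hb'⟩ := hb'
        obtain ⟨c, l, rem⟩ := b
        cases rem with
        | nil => simp [childOf] at hb'
        | cons r0 rest =>
          have hr : rest.length = m := by have := hlen _ hb; simp at this; omega
          simp only [childOf] at hb'
          rcases List.mem_cons.1 hb' with h | h
          · simp [h, hr]
          · split_ifs at h <;> simp_all
      simp only [List.nil_append, hfin, List.append_nil]
      rw [ih fuel _ _ hchildlen (by omega)]
      have : (curr.flatMap (childOf d limit)).flatMap (dfsOf d limit)
             = curr.flatMap (dfsOf d limit) := by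
        rw [List.flatMap_assoc]
        apply flatMap_congr'
        intro b hb
        obtain ⟨c, l, rem⟩ := b
        cases rem with
        | nil => exact absurd (hlen _ hb) (by simp)
        | cons r0 rest =>
          simp only [childOf, dfsOf, dfsB, List.flatMap_cons]
          split_ifs with h <;> simp [dfsOf]
      simp [this]

-- ===== VERDICT (by name: the statement is the Claim_ definition above) =====
theorem process_spec : Claim_equal_process := by
  intro songs limit _
  unfold Spec_process process process_alt
  rw [loopA_eq_dfs _ _ (PySem.Dict.ofList songs).keys.length _ _ _ (by simp) (by omega)]
  simp [dfsOf]
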